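-- pv_equiv track=rewrite | github.com/heinz-preisig/ProMo13 | packages/OntologyBuilder/BehaviourLinker_HAP_v0/Models/main.py | generate_token_combinations
-- ===== SOURCE A (Python) =====
-- def generate_token_combinations(tokens):
--   """Generate all possible non-empty combinations of tokens separated by underscores.
--
--   Args:
--       tokens: List of token strings to combine
--
--   Returns:
--       List of all possible combinations as strings
--   """
--   if not tokens:
--     return []
--
--   from itertools import combinations
--   all_combinations = []
--   # Generate combinations of all lengths from 1 to number of tokens
--   for r in range(1, len(tokens) + 1):
--     # Get all combinations of length r
--     for combo in combinations(tokens, r):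
--       # Join tokens with underscore
--       all_combinations.append('_'.join(combo))
--
--   # Remove duplicates while preserving order
--   return list(dict.fromkeys(all_combinations))
-- ===== SOURCE B (Python) =====
-- def generate_token_combinations(tokens):
--   """Generate all possible non-empty combinations of tokens separated by underscores."""
--   if not tokens:
--     return []
--
--   out = []
--
--   def rec(suffix, prefix, r):
--     if r == 0:
--       out.append('_'.join(prefix))
--     elif len(suffix) >= r:
--       rec(suffix[1:], prefix + [suffix[0]], r - 1)  # include first token
--       rec(suffix[1:], prefix, r)                    # skip first token
--
--   for r in range(1, len(tokens) + 1):
--     rec(tokens, [], r)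
--
--   seen = set()
--   result = []
--   for s in out:
--     if s not in seen:
--       seen.add(s)
--       result.append(s)
--   return result
-- ===== Notes on version B (the rewrite author's own statement) =====
-- stated objective: alternative
-- what changed: Replaces the itertools.combinations library call with a hand-written include/skip recursion that builds each joined combination from a growing prefix, and replaces the dict.fromkeys dedup with an explicit set+result-list first-occurrence loop.
import Mathlib
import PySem

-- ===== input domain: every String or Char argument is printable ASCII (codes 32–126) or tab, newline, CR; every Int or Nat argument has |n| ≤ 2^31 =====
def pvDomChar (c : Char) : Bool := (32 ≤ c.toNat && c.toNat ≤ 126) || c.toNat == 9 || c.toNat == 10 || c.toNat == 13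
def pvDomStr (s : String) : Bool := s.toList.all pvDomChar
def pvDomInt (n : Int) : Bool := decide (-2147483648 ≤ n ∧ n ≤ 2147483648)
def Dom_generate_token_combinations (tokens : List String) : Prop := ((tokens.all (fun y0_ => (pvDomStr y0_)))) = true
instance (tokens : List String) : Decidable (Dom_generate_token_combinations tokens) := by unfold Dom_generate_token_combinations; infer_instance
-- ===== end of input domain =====

-- B replaces itertools.combinations with an include/skip prefix recursion and dict.fromkeys
-- with a set+list first-occurrence loop; same values, no speed claim.

-- ===== PORT A =====
-- itertools.combinations(xs, r) in its exact emission order (length-grouped handled by the caller;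
-- increasing-index / lexicographic order within each r).
def pvCombosA : Nat → List String → List (List String)
  | 0, _ => [[]]
  | _ + 1, [] => []
  | r + 1, x :: xs => (pvCombosA r xs).map (fun c => x :: c) ++ pvCombosA (r + 1) xs

def generate_token_combinations (tokens : List String) : List String :=
  if tokens = [] then []
  else
    let all_combinations :=
      (List.range' 1 tokens.length).foldl
        (fun acc r => acc ++ (pvCombosA r tokens).map (fun c => PySem.Str.join "_" c)) []
    PySem.List.dedup all_combinations

-- ===== PORT B =====
def pvRecB : List String → List String → Nat → List String
  | _, pfx, 0 => [PySem.Str.join "_" pfx]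
  | [], _, _ + 1 => []
  | x :: xs, pfx, r + 1 =>
      if r + 1 ≤ xs.length + 1 then
        pvRecB xs (pfx ++ [x]) r ++ pvRecB xs pfx (r + 1)
      else []

def generate_token_combinations_alt (tokens : List String) : List String :=
  if tokens = [] then []
  else
    let out :=
      (List.range' 1 tokens.length).foldl (fun acc r => acc ++ pvRecB tokens [] r) []
    (out.foldl
      (fun (p : PySem.Set String × List String) s =>
        if PySem.Set.contains p.1 s then p else (PySem.Set.add p.1 s, p.2 ++ [s]))
      (PySem.Set.empty, [])).2

-- ===== PRECONDITION & SPEC =====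
def Spec_generate_token_combinations (tokens : List String) (out : List String) : Prop := out = generate_token_combinations_alt tokens
instance (tokens : List String) (out : List String) : Decidable (Spec_generate_token_combinations tokens out) := by unfold Spec_generate_token_combinations; infer_instance

-- ===== CLAIM (what is proved, stated in full; the proofs are below) =====
def Claim_equal_generate_token_combinations : Prop := ∀ (tokens : List String), Dom_generate_token_combinations tokens → Spec_generate_token_combinations tokens (generate_token_combinations tokens)

-- ===== LEMMAS AND PROOFS =====

theorem pvCombosA_nil_of_short (r : Nat) (xs : List String) (h : xs.length < r) :
    pvCombosA r xs = [] := by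
  induction xs generalizing r with
  | nil => cases r with
    | zero => omega
    | succ r => rfl
  | cons x xs ih =>
    cases r with
    | zero => omega
    | succ r =>
      simp only [pvCombosA]
      have h1 : xs.length < r := by simpa using h
      rw [ih r h1, ih (r + 1) (by omega)]
      rfl

theorem pvRecB_eq (sfx pfx : List String) (r : Nat) :
    pvRecB sfx pfx r = (pvCombosA r sfx).map (fun c => PySem.Str.join "_" (pfx ++ c)) := by
  induction sfx generalizing pfx r with
  | nil =>
    cases r with
    | zero => simp [pvRecB, pvCombosA]
    | succ r => simp [pvRecB, pvCombosA]
  | cons x xs ih =>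
    cases r with
    | zero => simp [pvRecB, pvCombosA]
    | succ r =>
      simp only [pvRecB]
      by_cases h : r + 1 ≤ xs.length + 1
      · rw [if_pos h, ih (pfx ++ [x]) r, ih pfx (r + 1)]
        simp [pvCombosA, Function.comp]
      · rw [if_neg h]
        have : (x :: xs).length < r + 1 := by simp; omega
        rw [pvCombosA_nil_of_short _ _ this]
        rfl

theorem pvDedupPair (l : List String) (s : List String) :
    l.foldl
      (fun (p : PySem.Set String × List String) x =>
        if PySem.Set.contains p.1 x then p else (PySem.Set.add p.1 x, p.2 ++ [x]))
      (s, s)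
    = (l.foldl PySem.Set.add s, l.foldl PySem.Set.add s) := by
  induction l generalizing s with
  | nil => rfl
  | cons x xs ih =>
    simp only [List.foldl_cons]
    have hstep :
        (if PySem.Set.contains s x then (s, s) else (PySem.Set.add s x, s ++ [x]))
          = ((PySem.Set.add s x : PySem.Set String), (PySem.Set.add s x : List String)) := by
      simp only [PySem.Set.add]
      split_ifs <;> rfl
    rw [hstep, ih]

theorem generate_token_combinations_spec : Claim_equal_generate_token_combinations := by
  intro tokens _
  unfold Spec_generate_token_combinations generate_token_combinations generate_token_combinations_alt
  by_cases h : tokens = []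
  · simp [h]
  · rw [if_neg h, if_neg h]
    have hfun :
        (fun (acc : List String) r => acc ++ (pvCombosA r tokens).map (fun c => PySem.Str.join "_" c))
          = (fun (acc : List String) r => acc ++ pvRecB tokens [] r) := by
      funext acc r
      rw [pvRecB_eq]
      simp
    rw [hfun,
      show (PySem.Set.empty : PySem.Set String) = ([] : List String) from rfl,
    ]
    simp only [pvDedupPair]
    simp [PySem.List.dedup_eq_ofList, PySem.Set.ofList_eq_foldl]
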